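-- pv_equiv track=rewrite | github.com/incoresemi/uatg | uatg/instruction_constants.py | alternate_ones
-- ===== SOURCE A (Python) =====
-- def twos(val, bits):
--     """
--         Finds the twos complement of the number
--
--         :param val: input to be complemented
--         :param bits: size of the input
--
--         :type val: str or int
--         :type bits: int
--
--         :result: two's complement version of the input
--
--     """
--     if isinstance(val, str):
--         if '0x' in val:
--             val = int(val, 16)
--         else:
--             val = int(val, 2)
--     if (val & (1 << (bits - 1))) != 0:
--         val = val - (1 << bits)
--     return val
--
-- def alternate_ones(size, signed=True):
--     coverpoints=[]
--     for s in range(2, size):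
--         t1 =( '' if s%2 == 0 else '1') + ''.join(['01']*int(s/2))
--         if not signed:
--              dataset = int(t1,2)
--         else:
--             dataset = twos(t1,s)
--         coverpoints.append(dataset)
--     return coverpoints
-- ===== SOURCE B (Python) =====
-- def alternate_ones(size, signed=True):
--     # Incremental recurrence: the alternating pattern of width s is the
--     # width-(s-1) pattern, plus a new top bit 2^(s-1) when s is odd.
--     coverpoints = []
--     u = 1  # unsigned value of the alternating pattern of width 1 ('1')
--     for s in range(2, size):
--         if s % 2:
--             u += 1 << (s - 1)
--         coverpoints.append(u - (1 << s) if signed and s % 2 else u)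
--     return coverpoints
-- ===== Notes on version B (the rewrite author's own statement) =====
-- stated objective: faster
-- what changed: replaced per-width binary-string construction + int(...,2) parsing + twos-complement helper by an O(1) incremental recurrence (add the new top bit when the width is odd, subtract 2^s for the signed odd case)
import Mathlib
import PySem

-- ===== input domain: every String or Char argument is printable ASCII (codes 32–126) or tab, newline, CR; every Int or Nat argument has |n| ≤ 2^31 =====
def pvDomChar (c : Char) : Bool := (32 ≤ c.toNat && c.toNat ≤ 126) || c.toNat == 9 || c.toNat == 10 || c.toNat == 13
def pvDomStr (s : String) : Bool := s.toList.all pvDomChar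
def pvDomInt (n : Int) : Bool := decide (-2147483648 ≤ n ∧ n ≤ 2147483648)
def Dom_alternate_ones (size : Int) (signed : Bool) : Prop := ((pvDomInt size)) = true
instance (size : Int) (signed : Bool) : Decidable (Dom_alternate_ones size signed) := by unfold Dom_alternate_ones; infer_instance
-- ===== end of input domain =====

-- B replaces A's per-width binary-string building + int(.,2) parsing + twos-complement helper
-- by an O(1)-per-step incremental recurrence on the previous value (objective: faster, asymptotic).


-- ===== PORT A =====
-- Hand-ported digit value of one char (int() digit semantics; exact for the '0'/'1'
-- digit chars this program ever parses, and for clean lower-case hex digits).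
def pvDigit (c : Char) : Int :=
  if '0' ≤ c ∧ c ≤ '9' then (c.toNat : Int) - 48
  else if 'a' ≤ c ∧ c ≤ 'f' then (c.toNat : Int) - 87
  else (c.toNat : Int) - 55

-- Hand port of int(cs, base): left-to-right accumulate. Exact for the nonempty,
-- unsigned, prefix-free digit strings this program builds (only '0'/'1' chars here).
def pvDigitsVal (base : Int) (cs : List Char) : Int :=
  cs.foldl (fun acc c => base * acc + pvDigit c) 0

-- port of twos(val, bits) for the str case A uses ('0x' in val = substring test;
-- bits ≥ 2 at every call site, so the shifts' .toNat is exact — Python raises on negative shifts)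
def pvTwos (val : List Char) (bits : Int) : Int :=
  let v : Int := if ['0', 'x'] <:+: val then pvDigitsVal 16 val else pvDigitsVal 2 val
  if PySem.Int.band v ((1 : Int) <<< (bits - 1).toNat) ≠ 0 then v - ((1 : Int) <<< bits.toNat) else v

def alternate_ones (size : Int) (signed : Bool) : List Int :=
  (PySem.List.pyRange 2 size 1).foldl
    (fun coverpoints s =>
      -- int(s/2) = s // 2 exactly for every s of this loop (2 ≤ s < size ≤ 2^31 < 2^53)
      let t1 : List Char :=
        (if PySem.Int.mod s 2 = 0 then [] else ['1']) ++
          PySem.Chars.join [] (PySem.List.pyRepeat [['0', '1']] (PySem.Int.floordiv s 2))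
      let dataset : Int := if !signed then pvDigitsVal 2 t1 else pvTwos t1 s
      coverpoints ++ [dataset]) []

-- ===== PORT B =====
def alternate_ones_alt (size : Int) (signed : Bool) : List Int :=
  ((PySem.List.pyRange 2 size 1).foldl
      (fun (st : List Int × Int) s =>
        let u : Int := if PySem.Int.mod s 2 ≠ 0 then st.2 + ((1 : Int) <<< (s - 1).toNat) else st.2
        (st.1 ++ [if signed && decide (PySem.Int.mod s 2 ≠ 0) then u - ((1 : Int) <<< s.toNat) else u],
         u))
      ([], 1)).1

-- ===== PRECONDITION & SPEC =====
def Spec_alternate_ones (size : Int) (signed : Bool) (out : List Int) : Prop := out = alternate_ones_alt size signed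
instance (size : Int) (signed : Bool) (out : List Int) : Decidable (Spec_alternate_ones size signed out) := by unfold Spec_alternate_ones; infer_instance

-- ===== CLAIM (what is proved, stated in full; the proofs are below) =====
def Claim_equal_alternate_ones : Prop := ∀ (size : Int) (signed : Bool), Dom_alternate_ones size signed → Spec_alternate_ones size signed (alternate_ones size signed)

-- ===== LEMMAS AND PROOFS =====

-- unsigned value of the alternating pattern of width n ('…0101', top bit only when n is odd)
def nuval : Nat → Nat
  | 0 => 0
  | k + 1 => if (k + 1) % 2 = 1 then 2 ^ k + nuval k else nuval k

-- unsigned value of '01' repeated k times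
def nJ : Nat → Nat
  | 0 => 0
  | k + 1 => 4 * nJ k + 1

-- the common per-width value both programs produce
def pvElem (signed : Bool) (s : Int) : Int :=
  if signed && decide (PySem.Int.mod s 2 ≠ 0) then (nuval s.toNat : Int) - 2 ^ s.toNat
  else (nuval s.toNat : Int)

-- the string A builds for width s, and the literal per-iteration value A appends
def pvT1 (s : Int) : List Char :=
  (if PySem.Int.mod s 2 = 0 then [] else ['1']) ++
    PySem.Chars.join [] (PySem.List.pyRepeat [['0', '1']] (PySem.Int.floordiv s 2))

def pvBodyA (signed : Bool) (s : Int) : Int :=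
  if !signed then pvDigitsVal 2 (pvT1 s) else pvTwos (pvT1 s) s

-- the updated register and the literal step function of alternate_ones_alt's fold
def pvU (st2 : Int) (s : Int) : Int :=
  if PySem.Int.mod s 2 ≠ 0 then st2 + ((1 : Int) <<< (s - 1).toNat) else st2

def pvBodyB (signed : Bool) (st : List Int × Int) (s : Int) : List Int × Int :=
  (st.1 ++ [if signed && decide (PySem.Int.mod s 2 ≠ 0) then pvU st.2 s - ((1 : Int) <<< s.toNat)
            else pvU st.2 s],
   pvU st.2 s)

theorem nJ_key (k : Nat) : 3 * nJ k + 1 = 4 ^ k := by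
  induction k with
  | zero => simp [nJ]
  | succ k ih => rw [nJ, pow_succ]; omega

theorem two_pow_double (k : Nat) : (2:Nat) ^ (2*k) = 4 ^ k := by
  rw [pow_mul]; norm_num

theorem nJ_lt (k : Nat) : nJ k < 2 ^ (2*k) := by
  have h := nJ_key k
  have h2 := two_pow_double k
  omega

theorem nJ_lt' (k : Nat) (hk : 1 ≤ k) : nJ k < 2 ^ (2*k - 1) := by
  have h := nJ_key k
  have h2 : (2:Nat) ^ (2*k) = 2 * 2 ^ (2*k - 1) := by
    rw [← pow_succ']; congr 1; omega
  have h3 := two_pow_double k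
  have h4 : 1 ≤ (2:Nat) ^ (2*k-1) := Nat.one_le_two_pow
  omega

theorem nuval_even (k : Nat) : nuval (2*k) = nJ k := by
  induction k with
  | zero => rfl
  | succ k ih =>
    have h : 2*(k+1) = (2*k+1)+1 := by ring
    rw [h, nuval, if_neg (by omega), nuval, if_pos (by omega), ih, nJ]
    have := nJ_key k
    have := two_pow_double k
    omega

theorem nuval_odd (k : Nat) : nuval (2*k+1) = 2^(2*k) + nJ k := by
  rw [nuval, if_pos (by omega), nuval_even]

theorem dv_shift (cs : List Char) : ∀ a : Int,
    cs.foldl (fun acc c => 2*acc + pvDigit c) a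
      = a * 2^cs.length + cs.foldl (fun acc c => 2*acc + pvDigit c) 0 := by
  induction cs with
  | nil => intro a; simp
  | cons c cs ih =>
    intro a
    simp only [List.foldl_cons, List.length_cons]
    rw [ih (2*a + pvDigit c), ih (2*0 + pvDigit c)]
    ring

theorem dv_flat (k : Nat) :
    pvDigitsVal 2 ((List.replicate k ['0','1']).flatten) = (nJ k : Int) := by
  induction k with
  | zero => simp [pvDigitsVal, nJ]
  | succ k ih =>
    unfold pvDigitsVal at *
    rw [List.replicate_succ', List.flatten_append, List.foldl_append, ih]
    show 2 * (2 * ((nJ k : Int)) + pvDigit '0') + pvDigit '1' = ((nJ (k+1) : Nat) : Int)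
    rw [show pvDigit '0' = 0 from by decide, show pvDigit '1' = 1 from by decide,
      show nJ (k+1) = 4 * nJ k + 1 from rfl]
    push_cast
    ring

theorem flat_len (k : Nat) : ((List.replicate k ['0','1']).flatten).length = 2*k := by
  simp [mul_comm]

theorem dv_one_flat (k : Nat) :
    pvDigitsVal 2 ('1' :: (List.replicate k ['0','1']).flatten)
      = ((2^(2*k) + nJ k : Nat) : Int) := by
  unfold pvDigitsVal
  rw [List.foldl_cons, dv_shift, flat_len]
  have h := dv_flat k
  unfold pvDigitsVal at h
  rw [h, show pvDigit '1' = 1 from by decide]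
  push_cast
  ring

theorem no_x_flat (k : Nat) : 'x' ∉ (List.replicate k ['0','1']).flatten := by
  intro h
  rw [List.mem_flatten] at h
  obtain ⟨l, hl, hx⟩ := h
  rw [List.eq_of_mem_replicate hl] at hx
  simp at hx

theorem not_infix_0x (cs : List Char) (h : 'x' ∉ cs) : ¬ (['0','x'] <:+: cs) :=
  fun hin => h (hin.subset (by simp))

theorem shl_one (m : Nat) : (1 : Int) <<< m = ((2^m : Nat) : Int) := by
  rw [Int.shiftLeft_eq]; push_cast; ring

theorem pyjoin_flatten (parts : List (List Char)) : PySem.Chars.join [] parts = parts.flatten := by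
  simp [PySem.Chars.join, List.intercalate]
  induction parts with
  | nil => simp
  | cons x xs ih => cases xs <;> simp_all [List.intersperse]

theorem mod2_cast (n : Nat) : PySem.Int.mod ((n:Int)) 2 = ((n % 2 : Nat) : Int) := by
  rw [PySem.Int.mod_eq_emod_of_pos (by norm_num)]; omega

theorem div2_cast (n : Nat) : PySem.Int.floordiv ((n:Int)) 2 = ((n / 2 : Nat) : Int) := by
  rw [PySem.Int.floordiv_eq_ediv_of_pos (by norm_num)]; omega

-- the string A builds for width n is the alternating pattern
theorem pvT1_even (k : Nat) (_hk : 1 ≤ k) :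
    pvT1 ((2*k : Nat) : Int) = (List.replicate k ['0','1']).flatten := by
  unfold pvT1
  rw [mod2_cast, div2_cast, pyjoin_flatten, PySem.List.pyRepeat_singleton,
    show (2*k) % 2 = 0 from by omega, show (2*k) / 2 = k from by omega]
  simp

theorem pvT1_odd (k : Nat) :
    pvT1 ((2*k+1 : Nat) : Int) = '1' :: (List.replicate k ['0','1']).flatten := by
  unfold pvT1
  rw [mod2_cast, div2_cast, pyjoin_flatten, PySem.List.pyRepeat_singleton,
    show (2*k+1) % 2 = 1 from by omega, show (2*k+1) / 2 = k from by omega]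
  simp

-- A's per-width value: the unsigned pattern value, minus 2^s for the signed odd widths
theorem bodyA_eq (signed : Bool) (s : Int) (hs : 2 ≤ s) : pvBodyA signed s = pvElem signed s := by
  obtain ⟨n, rfl⟩ : ∃ n : Nat, s = (n : Int) := ⟨s.toNat, (Int.toNat_of_nonneg (by omega)).symm⟩
  have hn : 2 ≤ n := by exact_mod_cast hs
  unfold pvBodyA pvElem
  rw [mod2_cast, Int.toNat_natCast]
  rcases Nat.even_or_odd n with ⟨k, hkk⟩ | ⟨k, hk⟩
  · -- even width n = 2k, k ≥ 1: top bit clear, twos is the identity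
    have hk2 : n = 2*k := by rw [hkk]; ring
    subst hk2
    have hk1 : 1 ≤ k := by omega
    rw [pvT1_even k hk1, show (2*k) % 2 = 0 from by omega]
    simp only [Nat.cast_zero, ne_eq, not_true_eq_false, decide_false, Bool.and_false,
      Bool.false_eq_true, if_false]
    cases signed with
    | false => simp [nuval_even, dv_flat]
    | true =>
      simp only [Bool.not_true, Bool.false_eq_true, if_false, pvTwos,
        if_neg (not_infix_0x _ (no_x_flat k)), dv_flat]
      rw [show ((2*k : Nat) : Int) - 1 = ((2*k - 1 : Nat) : Int) from by push_cast [hk1]; omega,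
        Int.toNat_natCast, shl_one, PySem.Int.band_natCast, Nat.and_two_pow,
        Nat.testBit_lt_two_pow (nJ_lt' k hk1)]
      simp [nuval_even]
  · -- odd width n = 2k+1: top bit set, twos subtracts 2^n
    subst hk
    rw [pvT1_odd k, show (2*k+1) % 2 = 1 from by omega]
    simp only [Nat.cast_one, ne_eq, one_ne_zero, not_false_eq_true, decide_true, Bool.and_true]
    cases signed with
    | false =>
      simp only [Bool.not_false, if_true, Bool.false_eq_true, if_false]
      rw [dv_one_flat, nuval_odd]
    | true =>
      simp only [Bool.not_true, Bool.false_eq_true, if_false, if_true, pvTwos]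
      have hnx : 'x' ∉ '1' :: (List.replicate k ['0','1']).flatten := by
        intro h
        rcases List.mem_cons.mp h with h | h
        · simp at h
        · exact no_x_flat k h
      rw [if_neg (not_infix_0x _ hnx), dv_one_flat,
        show ((2*k+1 : Nat) : Int) - 1 = ((2*k : Nat) : Int) from by push_cast; ring,
        Int.toNat_natCast, shl_one, PySem.Int.band_natCast, Nat.and_two_pow,
        Nat.testBit_two_pow_add_eq, Nat.testBit_lt_two_pow (nJ_lt k)]
      rw [if_pos (by norm_num), nuval_odd, Int.toNat_natCast, shl_one]
      push_cast
      ring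

-- one step of B's loop: the register goes from pattern-value (s-1) to pattern-value s
theorem step_u (signed : Bool) (a : Int) (ha : 2 ≤ a) (acc : List Int) :
    pvBodyB signed (acc, (nuval (a-1).toNat : Int)) a
      = (acc ++ [pvElem signed a], (nuval a.toNat : Int)) := by
  obtain ⟨n, rfl⟩ : ∃ n : Nat, a = (n : Int) := ⟨a.toNat, (Int.toNat_of_nonneg (by omega)).symm⟩
  have hn : 2 ≤ n := by exact_mod_cast ha
  obtain ⟨m, rfl⟩ : ∃ m : Nat, n = m + 1 := ⟨n - 1, by omega⟩
  unfold pvBodyB pvU pvElem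
  rw [show ((m+1 : Nat) : Int) - 1 = ((m : Nat) : Int) from by push_cast; ring]
  rw [mod2_cast, Int.toNat_natCast, Int.toNat_natCast]
  simp only [shl_one]
  by_cases hp : (m+1) % 2 = 1
  · rw [hp, nuval, if_pos hp]
    simp only [Nat.cast_one, ne_eq, one_ne_zero, not_false_eq_true, if_true, Prod.mk.injEq]
    refine ⟨?_, by push_cast; ring⟩
    cases signed with
    | false => simp; ring
    | true => simp; ring
  · rw [show (m+1) % 2 = 0 from by omega, nuval, if_neg hp]
    simp

theorem B_loop (signed : Bool) (n : Nat) : ∀ (a : Int) (acc : List Int), 2 ≤ a →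
    (PySem.List.pyRange a (a + (n:Int)) 1).foldl (pvBodyB signed) (acc, (nuval (a-1).toNat : Int))
      = (acc ++ (PySem.List.pyRange a (a + (n:Int)) 1).map (pvElem signed),
         (nuval (a + (n:Int) - 1).toNat : Int)) := by
  induction n with
  | zero =>
    intro a acc ha
    rw [show a + ((0:Nat):Int) = a from by push_cast; ring, PySem.List.pyRange_one_eq_nil (le_refl a)]
    simp
  | succ k ih =>
    intro a acc ha
    have hlt : a < a + ((k+1 : Nat) : Int) := by push_cast; omega
    rw [PySem.List.pyRange_one_cons hlt]
    simp only [List.foldl_cons, List.map_cons]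
    rw [step_u signed a ha acc, show a + ((k+1 : Nat) : Int) = (a+1) + (k : Int) from by push_cast; ring,
      show a.toNat = ((a+1)-1).toNat from by omega,
      ih (a+1) (acc ++ [pvElem signed a]) (by omega)]
    simp

theorem alternate_ones_spec : Claim_equal_alternate_ones := by
  intro size signed _
  unfold Spec_alternate_ones
  have hA : alternate_ones size signed = (PySem.List.pyRange 2 size 1).map (pvBodyA signed) := by
    show (PySem.List.pyRange 2 size 1).foldl (fun acc s => acc ++ [pvBodyA signed s]) [] = _
    rw [PySem.List.foldl_append_singleton_eq_map]
    simp
  rw [hA, List.map_congr_left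
    (fun s hs => bodyA_eq signed s (PySem.List.mem_pyRange_one.mp hs).1)]
  by_cases hsz : size ≤ 2
  · rw [PySem.List.pyRange_one_eq_nil hsz]
    simp [alternate_ones_alt, PySem.List.pyRange_one_eq_nil hsz]
  · obtain ⟨n, rfl⟩ : ∃ n : Nat, size = 2 + (n:Int) := ⟨(size-2).toNat, by omega⟩
    have hB := B_loop signed n 2 [] (le_refl 2)
    rw [show ((nuval ((2:Int)-1).toNat : Nat) : Int) = 1 from by norm_num [nuval]] at hB
    show _ = ((PySem.List.pyRange 2 (2 + (n:Int)) 1).foldl (pvBodyB signed) ([], 1)).1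
    rw [hB]
    simp
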